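-- pv_equiv track=rewrite | github.com/extremenetworks/ExtremeScripting | EXOS/Python/non_stacking_config_converter/non_stacking_config_convert.py | change_port
-- ===== SOURCE A (Python) =====
-- def change_port(port):
--     if port == '' or port == 'all' or port[-0] == '"': # no change on blank or all or port groups
--         return port
--     if ',' in port: # check for , for port list
--         ports = []
--         port = port.split(',') # split to table based on ,
--         for index in port: # changes each port index by index
--             port = '1:%s,' % index # adds 1: in front
--             ports.append(port) # appends each group of ports.
--         ports = "".join(ports) # puts the ports together
--         ports = ports.rstrip(ports[-1:]) # removes the last ", "
--         return ports
--
--     else: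
--         ports = "1:%s" % port # non portlist catch, adds "1:" to each port
--         return ports
-- ===== SOURCE B (Python) =====
-- def change_port(port):
--     if port == '' or port == 'all' or port[-0] == '"':  # no change on blank or all or port groups
--         return port
--     # prefix the first port and every port after a comma in one string operation
--     return '1:' + port.replace(',', ',1:')
-- ===== Notes on version B (the rewrite author's own statement) =====
-- stated objective: simpler
-- what changed: Replaces the split/loop/append/join/rstrip pipeline of the comma branch (and the separate non-list branch) with a single expression '1:' + port.replace(',', ',1:'), with no intermediate list, loop or trailing-comma cleanup.
import Mathlib
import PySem

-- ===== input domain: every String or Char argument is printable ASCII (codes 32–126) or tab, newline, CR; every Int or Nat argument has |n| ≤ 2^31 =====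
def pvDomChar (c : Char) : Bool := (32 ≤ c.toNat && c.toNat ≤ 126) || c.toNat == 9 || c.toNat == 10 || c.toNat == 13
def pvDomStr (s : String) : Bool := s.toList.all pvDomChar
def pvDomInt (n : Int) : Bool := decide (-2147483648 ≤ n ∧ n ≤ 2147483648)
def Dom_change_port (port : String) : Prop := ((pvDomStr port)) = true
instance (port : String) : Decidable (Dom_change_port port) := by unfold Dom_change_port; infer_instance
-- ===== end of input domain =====

-- B replaces A's split/loop/join/rstrip pipeline with one '1:' + replace(',', ',1:') expression (objective: simpler).

-- ===== PORT A =====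
-- loop "for index in port: port = '1:%s,' % index; ports.append(port)"
def changePortLoopA (parts : List (List Char)) (ports : List (List Char)) : List (List Char) :=
  match parts with
  | [] => ports
  | index :: rest => changePortLoopA rest (ports ++ [('1' :: ':' :: index) ++ [',']])

-- hand port of Python s.rstrip(chars) (PySem has no chars-argument rstrip): drop every
-- trailing character contained in `strip`; exact for Python str.rstrip(chars).
def pyRstripChars (cs strip : List Char) : List Char :=
  (cs.reverse.dropWhile (fun c => strip.contains c)).reverse

def change_port (port : String) : String :=
  if port == "" || port == "all" || PySem.Str.pyGet? port (-0) == some '"' then port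
  else if PySem.Chars.isIn [','] port.toList then
    String.ofList (pyRstripChars
      (PySem.Chars.join [] (changePortLoopA (PySem.Chars.splitOn port.toList [',']) []))
      (PySem.List.slice
        (PySem.Chars.join [] (changePortLoopA (PySem.Chars.splitOn port.toList [',']) []))
        (some (-1)) none))
  else
    String.ofList ('1' :: ':' :: port.toList)

-- ===== PORT B =====
def change_port_alt (port : String) : String :=
  if port == "" || port == "all" || PySem.Str.pyGet? port (-0) == some '"' then port
  else String.ofList ('1' :: ':' :: PySem.Chars.replace port.toList [','] [',', '1', ':'])

-- ===== PRECONDITION & SPEC =====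
def Spec_change_port (port : String) (out : String) : Prop := out = change_port_alt port
instance (port : String) (out : String) : Decidable (Spec_change_port port out) := by unfold Spec_change_port; infer_instance

-- ===== CLAIM (what is proved, stated in full; the proofs are below) =====
def Claim_equal_change_port : Prop := ∀ (port : String), Dom_change_port port → Spec_change_port port (change_port port)

-- ===== LEMMAS AND PROOFS =====

-- what port.replace(',', ',1:') computes, as a flatMap
def repChar (l : List Char) : List Char :=
  l.flatMap (fun c => if c = ',' then [',', '1', ':'] else [c])

-- what port.split(',') computes, recursively
def partsOf (cur l : List Char) : List (List Char) :=
  match l with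
  | [] => [cur]
  | c :: t => if c = ',' then cur :: partsOf [] t else partsOf (cur ++ [c]) t

theorem repChar_cons (c : Char) (t : List Char) :
    repChar (c :: t) = (if c = ',' then [',', '1', ':'] else [c]) ++ repChar t := by
  simp [repChar]

theorem repChar_no_comma {l : List Char} (h : ',' ∉ l) : repChar l = l := by
  induction l with
  | nil => rfl
  | cons c t ih =>
    rw [repChar_cons]
    rw [if_neg (by intro hc; exact h (hc ▸ List.mem_cons_self)),
        ih (fun hm => h (List.mem_cons_of_mem _ hm))]
    rfl

theorem repChar_getLast? (l : List Char) : (repChar l).getLast? ≠ some ',' := by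
  induction l with
  | nil => simp [repChar]
  | cons c t ih =>
    rw [repChar_cons, List.getLast?_append]
    cases hlast : (repChar t).getLast? with
    | none => by_cases hc : c = ',' <;> simp [hc, Option.or]
    | some x =>
      rw [hlast] at ih
      simpa [Option.or] using ih

theorem replace_go_spec (fuel : Nat) :
    ∀ (l acc : List Char), l.length ≤ fuel →
    PySem.Chars.replace.go [','] [',', '1', ':'] fuel l acc = acc.reverse ++ repChar l := by
  induction fuel with
  | zero =>
    intro l acc h
    have : l = [] := List.eq_nil_of_length_eq_zero (Nat.le_zero.mp h)
    subst this
    simp [PySem.Chars.replace.go, repChar]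
  | succ n ih =>
    intro l acc h
    cases l with
    | nil => simp [PySem.Chars.replace.go, repChar]
    | cons c t =>
      rw [PySem.Chars.replace.go]
      by_cases hc : c = ','
      · subst hc
        rw [if_pos (by simp [List.isPrefixOf])]
        have hd : List.drop [','].length (',' :: t) = t := rfl
        rw [hd, ih t _ (by simpa using Nat.le_of_succ_le_succ h)]
        simp [repChar_cons]
      · rw [if_neg (by simp [List.isPrefixOf, Ne.symm hc])]
        rw [ih t _ (by simpa using Nat.le_of_succ_le_succ h)]
        simp [repChar_cons, hc]

theorem replace_spec (l : List Char) :
    PySem.Chars.replace l [','] [',', '1', ':'] = repChar l := by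
  rw [PySem.Chars.replace]
  rw [if_neg (by simp)]
  simpa using replace_go_spec l.length l [] le_rfl

theorem splitOn_go_spec (fuel : Nat) :
    ∀ (l cur : List Char) (acc : List (List Char)), l.length ≤ fuel →
    PySem.Chars.splitOn.go [','] fuel l cur acc = acc.reverse ++ partsOf cur.reverse l := by
  induction fuel with
  | zero =>
    intro l cur acc h
    have : l = [] := List.eq_nil_of_length_eq_zero (Nat.le_zero.mp h)
    subst this
    simp [PySem.Chars.splitOn.go, partsOf]
  | succ n ih =>
    intro l cur acc h
    cases l with
    | nil => simp [PySem.Chars.splitOn.go, partsOf]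
    | cons c t =>
      rw [PySem.Chars.splitOn.go]
      by_cases hc : c = ','
      · subst hc
        rw [if_pos (by simp [List.isPrefixOf])]
        have hd : List.drop [','].length (',' :: t) = t := rfl
        rw [hd, ih t [] _ (by simpa using Nat.le_of_succ_le_succ h)]
        simp [partsOf]
      · rw [if_neg (by simp [List.isPrefixOf, Ne.symm hc])]
        rw [ih t (c :: cur) acc (by simpa using Nat.le_of_succ_le_succ h)]
        simp [partsOf, hc]

theorem splitOn_spec (l : List Char) :
    PySem.Chars.splitOn l [','] = partsOf [] l := by
  rw [PySem.Chars.splitOn]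
  simpa using splitOn_go_spec (l.length + 1) l [] [] (Nat.le_succ _)

theorem loopA_spec (parts : List (List Char)) :
    ∀ ports, changePortLoopA parts ports
      = ports ++ parts.map (fun p => ('1' :: ':' :: p) ++ [',']) := by
  induction parts with
  | nil => intro ports; simp [changePortLoopA]
  | cons p rest ih => intro ports; rw [changePortLoopA, ih]; simp

theorem join_nil_eq_flatten (ps : List (List Char)) :
    PySem.Chars.join [] ps = ps.flatten := by
  rw [PySem.Chars.join]
  induction ps with
  | nil => rfl
  | cons p t ih =>
    cases t with
    | nil => simp [List.intercalate]
    | cons q u =>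
      simp only [List.intercalate, List.intersperse, List.flatten] at *
      simpa using ih

theorem flatten_partsOf (l : List Char) :
    ∀ pre, ((partsOf pre l).map (fun p => ('1' :: ':' :: p) ++ [','])).flatten
      = ('1' :: ':' :: pre) ++ repChar l ++ [','] := by
  induction l with
  | nil => intro pre; simp [partsOf, repChar]
  | cons c t ih =>
    intro pre
    by_cases hc : c = ','
    · subst hc
      simp [partsOf, repChar_cons]
      simpa using ih []
    · simp only [partsOf, if_neg hc, ih (pre ++ [c])]
      simp [repChar_cons, hc]

theorem slice_neg_one_last {α : Type} (xs : List α) (y : α) :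
    PySem.List.slice (xs ++ [y]) (some (-1)) none = [y] := by
  simp only [PySem.List.slice, PySem.List.clampIdx]
  have hlen : ((xs ++ [y]).length : Int) = xs.length + 1 := by simp
  rw [if_pos (by norm_num), if_neg (by omega)]
  have h1 : ((xs ++ [y]).length + (-1 : Int)).toNat = xs.length := by omega
  rw [h1]
  simp

theorem rstrip_drop_last_comma {x : List Char} (h : x.getLast? ≠ some ',') :
    pyRstripChars (x ++ [',']) [','] = x := by
  unfold pyRstripChars
  rw [List.reverse_append,
    show (([','] : List Char).reverse ++ x.reverse) = ',' :: x.reverse from by simp,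
    List.dropWhile_cons, if_pos (by simp)]
  have hd : x.reverse.head? ≠ some ',' := by rwa [List.head?_reverse]
  have : x.reverse.dropWhile (fun c => [','].contains c) = x.reverse := by
    cases hx : x.reverse with
    | nil => rfl
    | cons a t =>
      rw [hx] at hd
      simp only [List.head?] at hd
      have ha : a ≠ ',' := fun hch => hd (by rw [hch])
      simp [List.dropWhile, ha]
  rw [this, List.reverse_reverse]

theorem comma_not_mem_of_not_isIn {l : List Char}
    (h : ¬ PySem.Chars.isIn [','] l = true) : ',' ∉ l := by
  intro hm
  obtain ⟨s, t, rfl⟩ := List.append_of_mem hm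
  exact h ((PySem.Chars.isIn_iff_infix _ _).mpr ⟨s, t, by simp⟩)

-- ===== VERDICT (by name: the statement is the Claim_ definition above) =====
theorem change_port_spec : Claim_equal_change_port := by
  intro port _
  unfold Spec_change_port change_port change_port_alt
  by_cases hg : (port == "" || port == "all" || PySem.Str.pyGet? port (-0) == some '"') = true
  · rw [if_pos hg, if_pos hg]
  · rw [if_neg hg, if_neg hg]
    by_cases hin : PySem.Chars.isIn [','] port.toList = true
    · rw [if_pos hin]
      rw [splitOn_spec, loopA_spec, List.nil_append, join_nil_eq_flatten, flatten_partsOf]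
      have hx : ('1' :: ':' :: ([] : List Char)) ++ repChar port.toList ++ [',']
          = ('1' :: ':' :: repChar port.toList) ++ [','] := by simp
      rw [hx, slice_neg_one_last]
      rw [rstrip_drop_last_comma (x := '1' :: ':' :: repChar port.toList)
        (by
          have h2 : ('1' :: ':' :: repChar port.toList) = ['1', ':'] ++ repChar port.toList := rfl
          rw [h2, List.getLast?_append]
          cases hlast : (repChar port.toList).getLast? with
          | none => simp [Option.or]
          | some x =>
            have := repChar_getLast? port.toList
            rw [hlast] at this
            simpa [Option.or] using this)]
      rw [replace_spec]
    · rw [if_neg hin, replace_spec,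
        repChar_no_comma (comma_not_mem_of_not_isIn hin)]
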